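-- pv_equiv track=rewrite | github.com/VoidNxSEC/cerebro | src/cerebro/core/rag/context_manager.py | _reorder_lost_in_middle
-- ===== SOURCE A (Python) =====
-- def _reorder_lost_in_middle(chunks: list) -> list:
--     """
--     Reordenação para mitigar lost-in-the-middle.
--
--     Dado N chunks ordenados por relevância [0..N-1]:
--     Resultado: [0, 2, 4, ..., 5, 3, 1]
--     Mais relevante no início, segundo mais relevante no fim,
--     menos relevantes no meio.
--
--     Isso explora o viés de attention do transformer:
--     tokens no início e no fim têm maior peso.
--     """
--     if len(chunks) <= 2:
--         return chunks
--
--     result = []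
--     left  = 0
--     right = len(chunks) - 1
--     toggle = True
--
--     while left <= right:
--         if toggle:
--             result.append(chunks[left])
--             left += 1
--         else:
--             result.append(chunks[right])
--             right -= 1
--         toggle = not toggle
--
--     return result
-- ===== SOURCE B (Python) =====
-- def _reorder_lost_in_middle(chunks: list) -> list:
--     if len(chunks) <= 2:
--         return chunks
--     half = (len(chunks) + 1) // 2
--     front = chunks[:half]
--     back = chunks[half:][::-1]
--     result = []
--     for f, b in zip(front, back):
--         result.append(f)
--         result.append(b)
--     if len(back) < len(front):
--         result.append(front[-1])
--     return result
-- ===== Notes on version B (the rewrite author's own statement) =====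
-- stated objective: faster
-- what changed: Replaces A's stateful two-pointer loop with per-element toggle by two materialised slices (front half, reversed back half) merged with zip, moving most per-element work into C-level slice/zip operations.
import Mathlib
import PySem

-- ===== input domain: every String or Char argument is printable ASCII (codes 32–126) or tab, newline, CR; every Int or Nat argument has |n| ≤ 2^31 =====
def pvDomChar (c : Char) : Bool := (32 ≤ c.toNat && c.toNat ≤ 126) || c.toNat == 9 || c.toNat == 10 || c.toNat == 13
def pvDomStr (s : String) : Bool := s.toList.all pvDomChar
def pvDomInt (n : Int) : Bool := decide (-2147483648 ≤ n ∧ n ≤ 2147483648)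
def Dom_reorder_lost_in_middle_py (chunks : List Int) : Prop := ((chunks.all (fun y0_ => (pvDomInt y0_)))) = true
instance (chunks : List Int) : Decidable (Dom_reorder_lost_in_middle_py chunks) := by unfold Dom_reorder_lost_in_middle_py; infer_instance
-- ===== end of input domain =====

-- B merges two materialised slices (front half, reversed back half) with zip instead of A's two-pointer toggle loop; measured faster by a constant factor (C-level slicing/zip).

-- ===== PORT A =====
-- the while loop; fuel = chunks.length bounds the number of iterations (the loop
-- runs exactly right-left+1 = chunks.length times); pyGet? is the in-range index,
-- .getD 0 is never taken since left/right stay in range while left ≤ right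
def pvLoopA (xs : List Int) : Nat → Int → Int → Bool → List Int → List Int
  | 0, _, _, _, result => result
  | fuel+1, left, right, toggle, result =>
    if left ≤ right then
      if toggle then
        pvLoopA xs fuel (left+1) right false (result ++ [(PySem.List.pyGet? xs left).getD 0])
      else
        pvLoopA xs fuel left (right-1) true (result ++ [(PySem.List.pyGet? xs right).getD 0])
    else result

def reorder_lost_in_middle_py (chunks : List Int) : List Int :=
  if chunks.length ≤ 2 then chunks
  else pvLoopA chunks chunks.length 0 ((chunks.length : Int) - 1) true []

-- ===== PORT B =====
def reorder_lost_in_middle_py_alt (chunks : List Int) : List Int :=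
  if chunks.length ≤ 2 then chunks
  else
    let half : Int := PySem.Int.floordiv ((chunks.length : Int) + 1) 2
    -- chunks[half:][::-1]: slice? with step -1 is never none, so .getD [] is safe
    let front := PySem.List.slice chunks none (some half)
    let back := (PySem.List.slice? (PySem.List.slice chunks (some half) none) none none (-1)).getD []
    -- for f, b in zip(front, back): result.append(f); result.append(b)
    let result := (front.zip back).foldl (fun acc p => (acc ++ [p.1]) ++ [p.2]) []
    -- front[-1]: in-range (front nonempty here), so .getD 0 is never taken
    if back.length < front.length then result ++ [(PySem.List.pyGet? front (-1)).getD 0]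
    else result

-- ===== PRECONDITION & SPEC =====
def Spec_reorder_lost_in_middle_py (chunks : List Int) (out : List Int) : Prop := out = reorder_lost_in_middle_py_alt chunks
instance (chunks : List Int) (out : List Int) : Decidable (Spec_reorder_lost_in_middle_py chunks out) := by unfold Spec_reorder_lost_in_middle_py; infer_instance

-- ===== CLAIM (what is proved, stated in full; the proofs are below) =====
def Claim_equal_reorder_lost_in_middle_py : Prop := ∀ (chunks : List Int), Dom_reorder_lost_in_middle_py chunks → Spec_reorder_lost_in_middle_py chunks (reorder_lost_in_middle_py chunks)

-- ===== LEMMAS AND PROOFS =====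

-- Source B's merge, as structural recursion (proof helper)
def pvInterleave : List Int → List Int → List Int
  | [], back => back
  | front, [] => front
  | f :: fs, b :: bs => f :: b :: pvInterleave fs bs

lemma pvFoldPairs : ∀ (l : List (Int × Int)) (acc : List Int),
    l.foldl (fun acc p => (acc ++ [p.1]) ++ [p.2]) acc = acc ++ l.flatMap (fun p => [p.1, p.2]) := by
  intro l
  induction l with
  | nil => intro acc; simp
  | cons p t ih => intro acc; simp [List.foldl_cons, List.flatMap_def]

lemma pvZipFlat : ∀ (front back : List Int), back.length ≤ front.length →
    front.length ≤ back.length + 1 →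
    (front.zip back).flatMap (fun p => [p.1, p.2]) ++
      (if back.length < front.length then [(PySem.List.pyGet? front (-1)).getD 0] else []) =
    pvInterleave front back := by
  intro front
  induction front with
  | nil =>
    intro back h1 _
    cases back with
    | nil => simp [pvInterleave]
    | cons b bs => simp at h1
  | cons f fs ih =>
    intro back h1 h2
    cases back with
    | nil =>
      cases fs with
      | nil => simp [pvInterleave, PySem.List.pyGet?_neg_one]
      | cons g gs => simp only [List.length_cons, List.length_nil] at h2; omega
    | cons b bs =>
      simp only [List.zip_cons_cons, List.flatMap_cons, List.cons_append, List.nil_append]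
      rw [show pvInterleave (f :: fs) (b :: bs) = f :: b :: pvInterleave fs bs from rfl]
      simp only [List.length_cons, Nat.add_lt_add_iff_right]
      by_cases hc : bs.length < fs.length
      · have hlast : (PySem.List.pyGet? (f :: fs) (-1)).getD 0 = (PySem.List.pyGet? fs (-1)).getD 0 := by
          cases fs with
          | nil => simp at hc
          | cons g gs =>
            rw [PySem.List.pyGet?_neg_one, PySem.List.pyGet?_neg_one, List.getLast?_cons_cons]
        rw [hlast]
        have := ih bs (by simp only [List.length_cons] at h1; omega)
          (by simp only [List.length_cons] at h2; omega)
        simp only [hc, if_true] at this ⊢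
        rw [← this]
      · have := ih bs (by simp only [List.length_cons] at h1; omega)
          (by simp only [List.length_cons] at h2; omega)
        simp only [hc, if_false] at this ⊢
        rw [← this]

-- the "lost-in-the-middle" order, characterised recursively: take the head, then
-- continue on the reversed remainder (taking from the right = head of the reverse)
def pvMid : List Int → List Int
  | [] => []
  | x :: t => x :: pvMid t.reverse
termination_by xs => xs.length
decreasing_by simp

lemma pvMid_nil : pvMid [] = [] := by simp [pvMid]

lemma pvMid_cons (x : Int) (t : List Int) : pvMid (x :: t) = x :: pvMid t.reverse := by
  simp [pvMid]

lemma pvLoopA_eq (xs : List Int) : ∀ (fuel : Nat) (l r : Int) (res : List Int) (tog : Bool),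
    0 ≤ l → r < (xs.length : Int) → (r + 1 - l).toNat ≤ fuel →
    pvLoopA xs fuel l r tog res =
      res ++ (if tog then pvMid ((xs.drop l.toNat).take (r + 1 - l).toNat)
              else pvMid ((xs.drop l.toNat).take (r + 1 - l).toNat).reverse) := by
  intro fuel
  induction fuel with
  | zero =>
    intro l r res tog hl hr hf
    have h0 : (r + 1 - l).toNat = 0 := by omega
    simp [pvLoopA, h0, pvMid_nil]
  | succ fuel ih =>
    intro l r res tog hl hr hf
    by_cases hlr : l ≤ r
    · have hln : l.toNat < xs.length := by omega
      have hrn : r.toNat < xs.length := by omega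
      set k : Nat := (r + 1 - l).toNat with hk
      have hk1 : 1 ≤ k := by omega
      have hdrop : xs.drop l.toNat = xs[l.toNat] :: xs.drop (l.toNat + 1) :=
        List.drop_eq_getElem_cons hln
      have hgl : (PySem.List.pyGet? xs l).getD 0 = xs[l.toNat] := by
        rw [PySem.List.pyGet?_eq_some_getElem xs hl (by omega)]; rfl
      have hgr : (PySem.List.pyGet? xs r).getD 0 = xs[r.toNat] := by
        rw [PySem.List.pyGet?_eq_some_getElem xs (by omega) (by omega)]; rfl
      cases tog with
      | true =>
        have step : pvLoopA xs (fuel+1) l r true res =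
            pvLoopA xs fuel (l+1) r false (res ++ [xs[l.toNat]]) := by
          simp [pvLoopA, hlr, hgl]
        rw [step, ih (l+1) r (res ++ [xs[l.toNat]]) false (by omega) hr (by omega)]
        have hseg : (xs.drop l.toNat).take k =
            xs[l.toNat] :: (xs.drop ((l+1).toNat)).take ((r + 1 - (l+1)).toNat) := by
          rw [hdrop]
          have : k = (r + 1 - (l+1)).toNat + 1 := by omega
          rw [this]
          have : (l+1).toNat = l.toNat + 1 := by omega
          rw [this, List.take_succ_cons]
        simp only [hseg, if_true, pvMid_cons]
        simp
      | false =>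
        have step : pvLoopA xs (fuel+1) l r false res =
            pvLoopA xs fuel l (r-1) true (res ++ [xs[r.toNat]]) := by
          simp [pvLoopA, hlr, hgr]
        rw [step, ih l (r-1) (res ++ [xs[r.toNat]]) true hl (by omega) (by omega)]
        have hseg : (xs.drop l.toNat).take k =
            (xs.drop l.toNat).take ((r - 1 + 1 - l).toNat) ++ [xs[r.toNat]] := by
          have hk' : k = (r - 1 + 1 - l).toNat + 1 := by omega
          rw [hk', List.take_add_one]
          have hidx : (xs.drop l.toNat)[(r - 1 + 1 - l).toNat]? = some xs[r.toNat] := by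
            rw [List.getElem?_drop]
            have : l.toNat + (r - 1 + 1 - l).toNat = r.toNat := by omega
            rw [this, List.getElem?_eq_getElem hrn]
          rw [hidx]
          rfl
        simp only [hseg, if_true]
        rw [List.reverse_append]
        simp only [List.reverse_cons, List.reverse_nil, List.nil_append, List.singleton_append,
          pvMid_cons, List.reverse_reverse]
        simp
    · have h0 : (r + 1 - l).toNat = 0 := by omega
      simp [pvLoopA, hlr, h0, pvMid_nil]

lemma pvInterleave_eq : ∀ (n : Nat) (xs : List Int), xs.length = n →
    pvInterleave (xs.take ((xs.length + 1) / 2)) ((xs.drop ((xs.length + 1) / 2)).reverse) = pvMid xs := by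
  intro n
  induction n using Nat.strong_induction_on with
  | _ n ih =>
    intro xs hn
    match xs with
    | [] => simp [pvInterleave, pvMid_nil]
    | [a] => simp [pvInterleave, pvMid_cons, pvMid_nil]
    | a :: t =>
      rcases t.eq_nil_or_concat with rfl | ⟨m, b, rfl⟩
      · simp [pvInterleave, pvMid_cons, pvMid_nil]
      · simp only [List.concat_eq_append]
        have hlen : (a :: (m ++ [b])).length = m.length + 2 := by simp
        have hh : ((a :: (m ++ [b])).length + 1) / 2 = (m.length + 1) / 2 + 1 := by
          rw [hlen]; omega
        have hmle : (m.length + 1) / 2 ≤ m.length := by omega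
        have htake : (a :: (m ++ [b])).take ((m.length + 1) / 2 + 1) = a :: m.take ((m.length + 1) / 2) := by
          rw [List.take_succ_cons, List.take_append_of_le_length hmle]
        have hdrop : (a :: (m ++ [b])).drop ((m.length + 1) / 2 + 1) = m.drop ((m.length + 1) / 2) ++ [b] := by
          rw [List.drop_succ_cons, List.drop_append_of_le_length hmle]
        rw [hh, htake, hdrop, List.reverse_append]
        simp only [List.reverse_cons, List.reverse_nil, List.nil_append, List.singleton_append]
        rw [show pvInterleave (a :: m.take ((m.length + 1) / 2)) (b :: (m.drop ((m.length + 1) / 2)).reverse) =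
              a :: b :: pvInterleave (m.take ((m.length + 1) / 2)) ((m.drop ((m.length + 1) / 2)).reverse) from rfl]
        have hrec : pvInterleave (m.take ((m.length + 1) / 2)) ((m.drop ((m.length + 1) / 2)).reverse) = pvMid m :=
          ih m.length (by simp only [List.concat_eq_append, List.length_cons, List.length_append] at hn; omega) m rfl
        rw [hrec, pvMid_cons, List.reverse_append]
        simp only [List.reverse_cons, List.reverse_nil, List.nil_append, List.singleton_append,
          pvMid_cons, List.reverse_reverse]

-- ===== VERDICT (by name: the statement is the Claim_ definition above) =====
theorem reorder_lost_in_middle_py_spec : Claim_equal_reorder_lost_in_middle_py := by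
  intro chunks _
  unfold Spec_reorder_lost_in_middle_py reorder_lost_in_middle_py reorder_lost_in_middle_py_alt
  by_cases h : chunks.length ≤ 2
  · simp [h]
  · simp only [h, if_false]
    have hA : pvLoopA chunks chunks.length 0 ((chunks.length : Int) - 1) true [] = pvMid chunks := by
      rw [pvLoopA_eq chunks chunks.length 0 ((chunks.length : Int) - 1) [] true (by omega)
        (by omega) (by omega)]
      simp
    rw [hA]
    have hhalf : PySem.Int.floordiv ((chunks.length : Int) + 1) 2 =
        (((chunks.length + 1) / 2 : Nat) : Int) := by
      rw [PySem.Int.floordiv_eq_ediv_of_pos (by omega)]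
      omega
    simp only [hhalf, PySem.List.slice_to_natCast, PySem.List.slice_from_natCast,
      PySem.List.slice?_none_none_neg_one, Option.getD_some]
    rw [pvFoldPairs]
    simp only [List.nil_append]
    have h1 : ((chunks.drop ((chunks.length + 1) / 2)).reverse).length ≤
        (chunks.take ((chunks.length + 1) / 2)).length := by simp; omega
    have h2 : (chunks.take ((chunks.length + 1) / 2)).length ≤
        ((chunks.drop ((chunks.length + 1) / 2)).reverse).length + 1 := by simp; omega
    have key := pvZipFlat (chunks.take ((chunks.length + 1) / 2))
      ((chunks.drop ((chunks.length + 1) / 2)).reverse) h1 h2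
    rw [pvInterleave_eq chunks.length chunks rfl] at key
    split_ifs at key ⊢ with hc
    · exact key.symm
    · simp only [List.append_nil] at key; exact key.symm
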